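-- pv_equiv track=rewrite | github.com/leixiaohui-1974/HydroSIS | hydrosis/parameters/zone.py | _collect_upstream
-- ===== SOURCE A (Python) =====
-- from typing import Dict, Iterable, List, Mapping, Optional, Sequence, Set
--
-- def _collect_upstream(node: str, upstream_index: Mapping[str, Sequence[str]]) -> Set[str]:
--     stack = [node]
--     visited: Set[str] = set()
--     while stack:
--         current = stack.pop()
--         if current in visited:
--             continue
--         visited.add(current)
--         for upstream in upstream_index.get(current, []):
--             stack.append(upstream)
--     return visited
-- ===== SOURCE B (Python) =====
-- from typing import Mapping, Sequence, Set
--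
--
-- def _collect_upstream(node: str, upstream_index: Mapping[str, Sequence[str]]) -> Set[str]:
--     # Recursive depth-first visit over the graph structure instead of an
--     # explicit worklist stack.  Neighbours are visited right-to-left; the
--     # visiting order does not affect the returned set.
--     visited: Set[str] = set()
--
--     def visit(current: str) -> None:
--         if current in visited:
--             return
--         visited.add(current)
--         for upstream in reversed(upstream_index.get(current, [])):
--             visit(upstream)
--
--     visit(node)
--     return visited
-- ===== Notes on version B (the rewrite author's own statement) =====
-- stated objective: alternative
-- what changed: Replaces the explicit-stack worklist loop (pop, membership guard, push children) with a recursive depth-first visit over the graph structure that accumulates the same visited set.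
import Mathlib
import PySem

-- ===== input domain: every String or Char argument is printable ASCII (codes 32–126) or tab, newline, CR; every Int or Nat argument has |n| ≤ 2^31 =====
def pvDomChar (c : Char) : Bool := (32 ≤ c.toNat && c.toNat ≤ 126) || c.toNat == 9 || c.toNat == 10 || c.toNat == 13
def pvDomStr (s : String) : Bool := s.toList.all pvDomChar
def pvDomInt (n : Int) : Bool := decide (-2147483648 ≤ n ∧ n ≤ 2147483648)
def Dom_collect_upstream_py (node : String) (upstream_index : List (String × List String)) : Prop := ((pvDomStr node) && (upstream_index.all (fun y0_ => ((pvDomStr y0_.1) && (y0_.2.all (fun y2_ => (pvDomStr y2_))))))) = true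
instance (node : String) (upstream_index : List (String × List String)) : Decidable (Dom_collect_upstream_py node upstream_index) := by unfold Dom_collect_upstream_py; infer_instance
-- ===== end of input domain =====

-- B replaces A's explicit-stack worklist loop with a recursive depth-first visit over the
-- graph structure (alternative decomposition, same complexity; neither is claimed faster).

-- ===== PORT A =====
-- upstream_index.get(current, []) — the dict lookup A performs
def pvGetU (upstream_index : List (String × List String)) (current : String) : List String :=
  PySem.Dict.getD (PySem.Dict.ofList upstream_index) current []

-- Termination measure for A's while-loop: twice the total size of the child lists of the
-- not-yet-visited keys (each first visit of a key consumes its 2·|children| budget while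
-- pushing only |children| new work items).
def pvSig (upstream_index : List (String × List String)) (visited : List String) : Nat :=
  ((PySem.Dict.ofList upstream_index).keys.map
    (fun k => if k ∈ visited then 0 else 2 * (pvGetU upstream_index k).length)).sum

theorem pvSig_aux (g : String → Nat) (c : String) (v : List String) (hc : c ∉ v) :
    ∀ K : List String,
      (K.map (fun k => if k ∈ v ++ [c] then 0 else g k)).sum + (if c ∈ K then g c else 0)
        ≤ (K.map (fun k => if k ∈ v then 0 else g k)).sum := by
  intro K
  induction K with
  | nil => simp
  | cons k K ih =>
    simp only [List.map_cons, List.sum_cons]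
    by_cases hkc : k = c
    · subst hkc
      rw [if_pos (show k ∈ v ++ [k] by simp)]
      rw [if_neg hc]
      rw [if_pos (List.mem_cons_self)]
      by_cases hcK : k ∈ K
      · rw [if_pos hcK] at ih; omega
      · rw [if_neg hcK] at ih; omega
    · have hmem : (k ∈ v ++ [c]) ↔ (k ∈ v) := by simp [List.mem_append, hkc]
      have hck : (c ∈ k :: K) ↔ (c ∈ K) := by
        rw [List.mem_cons]
        constructor
        · intro h
          rcases h with h1 | h1
          · exact absurd h1.symm hkc
          · exact h1
        · intro h
          exact Or.inr h
      by_cases hcK : c ∈ K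
      · rw [if_pos (hck.mpr hcK)]
        rw [if_pos hcK] at ih
        by_cases hkv : k ∈ v
        · rw [if_pos (hmem.mpr hkv), if_pos hkv]; omega
        · rw [if_neg (fun h => hkv (hmem.mp h)), if_neg hkv]; omega
      · rw [if_neg (fun h => hcK (hck.mp h))]
        rw [if_neg hcK] at ih
        by_cases hkv : k ∈ v
        · rw [if_pos (hmem.mpr hkv), if_pos hkv]; omega
        · rw [if_neg (fun h => hkv (hmem.mp h)), if_neg hkv]; omega

theorem pvDict_get?_none {ν : Type} (d : PySem.Dict String ν) (c : String)
    (h : c ∉ d.keys) : d.get? c = none := by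
  obtain ⟨items⟩ := d
  induction items with
  | nil => rfl
  | cons kv rest ih =>
    rw [show (⟨kv :: rest⟩ : PySem.Dict String ν) = ⟨(kv.1, kv.2) :: rest⟩ by rfl]
    rw [PySem.Dict.get?_mk_cons]
    rw [PySem.Dict.keys_mk] at h
    simp only [List.map_cons, List.mem_cons] at h
    rw [not_or] at h
    rw [if_neg (by simp only [beq_iff_eq]; exact fun e => h.1 e.symm)]
    exact ih (by rw [PySem.Dict.keys_mk]; exact fun hm => h.2 hm)

theorem pvSet_add_of_not_mem {v : List String} {c : String} (hc : c ∉ v) :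
    PySem.Set.add v c = v ++ [c] := by
  rw [PySem.Set.add, if_neg]
  simp [PySem.Set.contains]
  exact hc

theorem pvSig_drop (upstream_index : List (String × List String)) {v : List String} {c : String}
    (hc : c ∉ v) :
    pvSig upstream_index (v ++ [c]) + 2 * (pvGetU upstream_index c).length
      ≤ pvSig upstream_index v := by
  have haux : pvSig upstream_index (v ++ [c])
      + (if c ∈ (PySem.Dict.ofList upstream_index).keys
          then 2 * (pvGetU upstream_index c).length else 0)
      ≤ pvSig upstream_index v :=
    pvSig_aux (fun k => 2 * (pvGetU upstream_index k).length) c v hc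
      (PySem.Dict.ofList upstream_index).keys
  by_cases hk : c ∈ (PySem.Dict.ofList upstream_index).keys
  · rwa [if_pos hk] at haux
  · have h0 : pvGetU upstream_index c = [] := by
      unfold pvGetU
      rw [PySem.Dict.getD, pvDict_get?_none _ _ hk]
      rfl
    rw [if_neg hk] at haux
    rw [h0]
    simpa using haux

theorem pvLoopA_dec1 (upstream_index : List (String × List String)) (stack : List String)
    (visited : List String) (hne : stack ≠ []) :
    stack.dropLast.length + pvSig upstream_index visited
      < stack.length + pvSig upstream_index visited := by
  have hpos : 0 < stack.length := List.length_pos_iff.mpr hne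
  have h1 : stack.dropLast.length = stack.length - 1 := by simp
  omega

theorem pvLoopA_dec2 (upstream_index : List (String × List String)) (stack : List String)
    (visited : List String) (hne : stack ≠ []) (hmem : stack.getLast hne ∉ visited) :
    (stack.dropLast ++ pvGetU upstream_index (stack.getLast hne)).length
        + pvSig upstream_index (PySem.Set.add visited (stack.getLast hne))
      < stack.length + pvSig upstream_index visited := by
  have hpos : 0 < stack.length := List.length_pos_iff.mpr hne
  have h1 : stack.dropLast.length = stack.length - 1 := by simp
  rw [pvSet_add_of_not_mem hmem]
  have hd := pvSig_drop upstream_index (v := visited) (c := stack.getLast hne) hmem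
  simp only [List.length_append]
  omega

-- while stack: current = stack.pop(); if current in visited: continue;
-- visited.add(current); for upstream in upstream_index.get(current, []): stack.append(upstream)
def pvLoopA (upstream_index : List (String × List String)) (stack : List String)
    (visited : PySem.Set String) : List String :=
  if hne : stack = [] then visited
  else
    if hmem : stack.getLast hne ∈ visited then pvLoopA upstream_index stack.dropLast visited
    else pvLoopA upstream_index (stack.dropLast ++ pvGetU upstream_index (stack.getLast hne))
        (PySem.Set.add visited (stack.getLast hne))
termination_by stack.length + pvSig upstream_index visited
decreasing_by
  · exact pvLoopA_dec1 upstream_index stack visited hne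
  · exact pvLoopA_dec2 upstream_index stack visited hne hmem

def collect_upstream_py (node : String) (upstream_index : List (String × List String)) :
    List String :=
  pvLoopA upstream_index [node] PySem.Set.empty

-- ===== PORT B =====
-- visit(current): if current in visited: return; visited.add(current);
--   for upstream in reversed(upstream_index.get(current, [])): visit(upstream)
-- The Nat argument is a fuel bound making the structural recursion total; one fuel unit is
-- spent per nesting level, and each nesting level visits a previously unvisited key of the
-- index, so #keys + 1 fuel (supplied below) is never exhausted.
def pvVisitB (upstream_index : List (String × List String)) :
    Nat → String → PySem.Set String → PySem.Set String
  | 0, _, visited => visited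
  | Nat.succ fuel, current, visited =>
    if current ∈ visited then visited
    else
      ((PySem.Dict.getD (PySem.Dict.ofList upstream_index) current []).reverse).foldl
        (fun vv u => pvVisitB upstream_index fuel u vv)
        (PySem.Set.add visited current)

def collect_upstream_py_alt (node : String) (upstream_index : List (String × List String)) :
    List String :=
  pvVisitB upstream_index ((PySem.Dict.ofList upstream_index).keys.length + 1) node
    PySem.Set.empty

-- ===== PRECONDITION & SPEC =====
def Spec_collect_upstream_py (node : String) (upstream_index : List (String × List String)) (out : List String) : Prop := out = collect_upstream_py_alt node upstream_index
instance (node : String) (upstream_index : List (String × List String)) (out : List String) : Decidable (Spec_collect_upstream_py node upstream_index out) := by unfold Spec_collect_upstream_py; infer_instance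

-- ===== CLAIM (what is proved, stated in full; the proofs are below) =====
def Claim_equal_collect_upstream_py : Prop := ∀ (node : String) (upstream_index : List (String × List String)), Dom_collect_upstream_py node upstream_index → Spec_collect_upstream_py node upstream_index (collect_upstream_py node upstream_index)

-- ===== LEMMAS AND PROOFS =====

-- Number of keys of the index not yet visited: B's recursion nests at most this deep.
def pvNK (upstream_index : List (String × List String)) (v : List String) : Nat :=
  (((PySem.Dict.ofList upstream_index).keys).filter (fun k => k ∉ v)).length

theorem pvNK_mono (upstream_index : List (String × List String)) {v w : List String}
    (h : v ⊆ w) : pvNK upstream_index w ≤ pvNK upstream_index v := by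
  unfold pvNK
  rw [← List.countP_eq_length_filter, ← List.countP_eq_length_filter]
  apply List.countP_mono_left
  intro x _ hx
  simp only [decide_eq_true_eq] at *
  exact fun hv => hx (h hv)

theorem pvNK_strict (upstream_index : List (String × List String)) {v : List String}
    {c : String} (hk : c ∈ (PySem.Dict.ofList upstream_index).keys) (hc : c ∉ v) :
    pvNK upstream_index (v ++ [c]) < pvNK upstream_index v := by
  unfold pvNK
  generalize (PySem.Dict.ofList upstream_index).keys = L at hk
  induction L with
  | nil => simp at hk
  | cons a L ih =>
    by_cases hac : a = c
    · subst hac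
      rw [List.filter_cons, List.filter_cons]
      have h1 : (decide (a ∉ v ++ [a])) = false := by simp
      have h2 : (decide (a ∉ v)) = true := by simpa using hc
      rw [h1, h2]
      have hle : (L.filter (fun k => k ∉ v ++ [a])).length
          ≤ (L.filter (fun k => k ∉ v)).length := by
        rw [← List.countP_eq_length_filter, ← List.countP_eq_length_filter]
        apply List.countP_mono_left
        intro x _ hx
        simp only [decide_eq_true_eq, List.mem_append, List.mem_singleton] at *
        exact fun hv => hx (Or.inl hv)
      simp only [Bool.false_eq_true, if_false, if_true, List.length_cons]
      omega
    · have hkL : c ∈ L := by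
        rcases List.mem_cons.mp hk with h | h
        · exact absurd h.symm hac
        · exact h
      have hlt := ih hkL
      rw [List.filter_cons, List.filter_cons]
      have heq : (decide (a ∉ v ++ [c])) = (decide (a ∉ v)) := by
        simp [List.mem_append, hac]
      rw [heq]
      by_cases hav : a ∉ v
      · rw [if_pos (by simpa using hav), if_pos (by simpa using hav)]
        simp only [List.length_cons]
        omega
      · rw [if_neg (by simpa using hav), if_neg (by simpa using hav)]
        omega

theorem pvSet_subset_add (v : List String) (c : String) : v ⊆ PySem.Set.add v c := by
  rw [PySem.Set.add]
  split
  · exact fun _ hx => hx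
  · exact fun _ hx => List.mem_append_left _ hx

theorem pvVisitB_subset (upstream_index : List (String × List String)) :
    ∀ (fuel : Nat) (c : String) (v : PySem.Set String), v ⊆ pvVisitB upstream_index fuel c v := by
  intro fuel
  induction fuel with
  | zero => intro c v x hx; simpa [pvVisitB] using hx
  | succ fuel ih =>
    have hfold : ∀ (l : List String) (v : PySem.Set String),
        v ⊆ l.foldl (fun vv u => pvVisitB upstream_index fuel u vv) v := by
      intro l
      induction l with
      | nil => intro v x hx; simpa using hx
      | cons a l ihl => intro v x hx; exact ihl _ (ih a v hx)
    intro c v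
    rw [pvVisitB]
    by_cases h : c ∈ v
    · rw [if_pos h]
      exact fun _ hx => hx
    · rw [if_neg h]
      exact fun x hx => hfold _ _ (pvSet_subset_add v c hx)

-- Popping c off the top of A's stack runs exactly B's recursive visit of c (given fuel
-- exceeding the number of unvisited keys).
theorem pvBridge (upstream_index : List (String × List String)) :
    ∀ fuel : Nat,
      (∀ (s : List String) (c : String) (v : List String),
          pvNK upstream_index v < fuel →
          pvLoopA upstream_index (s ++ [c]) v
            = pvLoopA upstream_index s (pvVisitB upstream_index fuel c v))
      ∧ (∀ (l s : List String) (v : List String),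
          pvNK upstream_index v < fuel →
          pvLoopA upstream_index (s ++ l) v
            = pvLoopA upstream_index s
                (l.reverse.foldl (fun vv u => pvVisitB upstream_index fuel u vv) v)) := by
  intro fuel
  induction fuel with
  | zero =>
    exact ⟨fun s c v h => absurd h (Nat.not_lt_zero _),
           fun l s v h => absurd h (Nat.not_lt_zero _)⟩
  | succ fuel ih =>
    have hP : ∀ (s : List String) (c : String) (v : List String),
        pvNK upstream_index v < fuel + 1 →
        pvLoopA upstream_index (s ++ [c]) v
          = pvLoopA upstream_index s (pvVisitB upstream_index (fuel + 1) c v) := by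
      intro s c v hb
      have hne : s ++ [c] ≠ [] := by simp
      rw [pvLoopA, dif_neg hne]
      simp only [List.getLast_concat, List.dropLast_concat]
      by_cases hc : c ∈ v
      · rw [dif_pos hc]
        have hv : pvVisitB upstream_index (fuel + 1) c v = v := by
          rw [pvVisitB, if_pos hc]
        rw [hv]
      · rw [dif_neg hc]
        have hrhs : pvVisitB upstream_index (fuel + 1) c v
            = (pvGetU upstream_index c).reverse.foldl
                (fun vv u => pvVisitB upstream_index fuel u vv) (PySem.Set.add v c) := by
          rw [pvVisitB, if_neg hc]
          rfl
        rw [hrhs, pvSet_add_of_not_mem hc]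
        by_cases hk : c ∈ (PySem.Dict.ofList upstream_index).keys
        · have hlt : pvNK upstream_index (v ++ [c]) < fuel := by
            have := pvNK_strict upstream_index hk hc
            omega
          exact ih.2 (pvGetU upstream_index c) s (v ++ [c]) hlt
        · have h0 : pvGetU upstream_index c = [] := by
            unfold pvGetU
            rw [PySem.Dict.getD, pvDict_get?_none _ _ hk]
            rfl
          rw [h0]
          simp
    refine ⟨hP, ?_⟩
    intro l
    induction l using List.reverseRecOn with
    | nil =>
      intro s v _
      simp
    | append_singleton l' d ihl =>
      intro s v hb
      rw [show s ++ (l' ++ [d]) = (s ++ l') ++ [d] from by rw [List.append_assoc]]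
      rw [hP (s ++ l') d v hb]
      have hb' : pvNK upstream_index (pvVisitB upstream_index (fuel + 1) d v) < fuel + 1 :=
        Nat.lt_of_le_of_lt (pvNK_mono upstream_index (pvVisitB_subset upstream_index _ d v)) hb
      rw [ihl s _ hb']
      rw [show (l' ++ [d]).reverse = d :: l'.reverse from by rw [List.reverse_append]; rfl]
      rfl

-- ===== VERDICT (by name: the statement is the Claim_ definition above) =====
theorem collect_upstream_py_spec : Claim_equal_collect_upstream_py := by
  unfold Claim_equal_collect_upstream_py
  intro node upstream_index _
  unfold Spec_collect_upstream_py collect_upstream_py collect_upstream_py_alt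
  have hb : pvNK upstream_index PySem.Set.empty
      < (PySem.Dict.ofList upstream_index).keys.length + 1 := by
    have := List.length_filter_le (fun k => k ∉ (PySem.Set.empty : PySem.Set String))
      (PySem.Dict.ofList upstream_index).keys
    unfold pvNK
    omega
  have h := (pvBridge upstream_index ((PySem.Dict.ofList upstream_index).keys.length + 1)).1
      [] node PySem.Set.empty hb
  simp only [List.nil_append] at h
  rw [h, pvLoopA]
  simp
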